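-- pv_equiv track=rewrite | github.com/MarcChesebro/Translation_machine | corpora_utils.py | create_indexed_dictionary
-- ===== SOURCE A (Python) =====
-- from collections import Counter
--
-- def create_indexed_dictionary(sentences, dict_size=10000):
--     count_words = Counter()
--     dict_words = {}
--     for sen in sentences:
--         for word in sen:
--             count_words[word] += 1
--
--     vocab = []
--     for idx, item in enumerate(count_words.most_common(dict_size)):
--         dict_words[item[0]] = idx
--         vocab.append((dict_words[item[0]], count_words[item[0]]))
--
--     return dict_words, vocab
-- ===== SOURCE B (Python) =====
-- def create_indexed_dictionary(sentences, dict_size=10000):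
--     counts = {}
--     for sen in sentences:
--         for word in sen:
--             counts[word] = counts.get(word, 0) + 1
--
--     # bucket the words by frequency (first-occurrence order within a bucket)
--     buckets = {}
--     for word, c in counts.items():
--         buckets.setdefault(c, []).append(word)
--
--     # walk the frequencies from highest to lowest and take the first dict_size words
--     top = []
--     for c in sorted(buckets, reverse=True):
--         top.extend((w, c) for w in buckets[c])
--     k = dict_size if dict_size > 0 else 0
--     top = top[:k]
--
--     dict_words = {w: i for i, (w, _) in enumerate(top)}
--     vocab = [(i, c) for i, (_, c) in enumerate(top)]
--     return dict_words, vocab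
-- ===== Notes on version B (the rewrite author's own statement) =====
-- stated objective: alternative
-- what changed: Replaces Counter.most_common (a sort/heap-selection over all (word,count) items) by a frequency-bucket sort: words are grouped into count buckets, only the distinct counts are sorted descending, the buckets are concatenated and sliced to dict_size, and the dict/vocab are built by enumerate comprehensions instead of the index-then-relookup loop.
import Mathlib
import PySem

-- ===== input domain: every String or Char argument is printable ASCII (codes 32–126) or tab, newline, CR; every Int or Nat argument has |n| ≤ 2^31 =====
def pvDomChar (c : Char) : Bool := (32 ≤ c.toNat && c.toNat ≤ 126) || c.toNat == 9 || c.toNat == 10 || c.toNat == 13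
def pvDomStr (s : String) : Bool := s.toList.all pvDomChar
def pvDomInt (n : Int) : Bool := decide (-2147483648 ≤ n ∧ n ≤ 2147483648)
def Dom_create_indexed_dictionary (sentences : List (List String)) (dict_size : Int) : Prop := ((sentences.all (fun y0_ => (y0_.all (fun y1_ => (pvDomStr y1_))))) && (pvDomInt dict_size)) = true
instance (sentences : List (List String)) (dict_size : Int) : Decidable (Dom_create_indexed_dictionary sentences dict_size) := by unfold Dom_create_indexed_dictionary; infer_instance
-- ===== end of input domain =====

-- B replaces Counter.most_common by a frequency-bucket sort (sort only the distinct counts,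
-- concatenate the buckets, slice) and builds dict/vocab by enumerate comprehensions; objective: alternative.


-- ===== PORT A =====
def create_indexed_dictionary (sentences : List (List String)) (dict_size : Int) : (List (String × Int)) × (List (Int × Int)) :=
  -- count_words[word] += 1 over the nested loops
  let count_words : PySem.Dict String Int :=
    sentences.foldl (fun d sen => sen.foldl (fun d word => d.modify word 0 (· + 1)) d) PySem.Dict.empty
  -- count_words.most_common(dict_size): the items stably sorted by count descending, first
  -- dict_size of them; heapq.nlargest returns [] for dict_size ≤ 0
  let common : List (String × Int) :=
    if dict_size ≤ 0 then []
    else (PySem.List.sorted count_words.items (fun item => item.2) true).take dict_size.toNat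
  -- for idx, item in enumerate(...): dict_words[item[0]] = idx; vocab.append(...)
  let st : PySem.Dict String Int × List (Int × Int) :=
    (PySem.List.enumerate common).foldl
      (fun (st : PySem.Dict String Int × List (Int × Int)) ie =>
        let dw := st.1.insert ie.2.1 ie.1
        (dw, st.2 ++ [(dw.getD ie.2.1 0, count_words.getD ie.2.1 0)]))
      (PySem.Dict.empty, [])
  (st.1.items, st.2)

-- ===== PORT B =====
def create_indexed_dictionary_alt (sentences : List (List String)) (dict_size : Int) : (List (String × Int)) × (List (Int × Int)) :=
  -- counts[word] = counts.get(word, 0) + 1 over the nested loops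
  let counts : PySem.Dict String Int :=
    sentences.foldl (fun d sen => sen.foldl (fun d word => d.insert word (d.getD word 0 + 1)) d) PySem.Dict.empty
  -- buckets.setdefault(c, []).append(word)
  let buckets : PySem.Dict Int (List String) :=
    counts.items.foldl (fun b p => b.modify p.2 [] (· ++ [p.1])) PySem.Dict.empty
  -- for c in sorted(buckets, reverse=True): top.extend((w, c) for w in buckets[c])
  let top0 : List (String × Int) :=
    (PySem.List.sorted buckets.keys (fun c => c) true).foldl
      (fun acc c => acc ++ (buckets.getD c []).map (fun w => (w, c))) []
  -- k = dict_size if dict_size > 0 else 0; top = top[:k]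
  let k : Int := if dict_size > 0 then dict_size else 0
  let top : List (String × Int) := PySem.List.slice top0 none (some k)
  -- dict_words = {w: i for i, (w, _) in enumerate(top)}
  let dict_words : PySem.Dict String Int :=
    (PySem.List.enumerate top).foldl (fun d iw => d.insert iw.2.1 iw.1) PySem.Dict.empty
  -- vocab = [(i, c) for i, (_, c) in enumerate(top)]
  let vocab : List (Int × Int) := (PySem.List.enumerate top).map (fun iw => (iw.1, iw.2.2))
  (dict_words.items, vocab)

-- ===== PRECONDITION & SPEC =====
def Spec_create_indexed_dictionary (sentences : List (List String)) (dict_size : Int) (out : (List (String × Int)) × (List (Int × Int))) : Prop := out = create_indexed_dictionary_alt sentences dict_size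
instance (sentences : List (List String)) (dict_size : Int) (out : (List (String × Int)) × (List (Int × Int))) : Decidable (Spec_create_indexed_dictionary sentences dict_size out) := by unfold Spec_create_indexed_dictionary; infer_instance

-- ===== CLAIM (what is proved, stated in full; the proofs are below) =====
def Claim_equal_create_indexed_dictionary : Prop := ∀ (sentences : List (List String)) (dict_size : Int), Dom_create_indexed_dictionary sentences dict_size → Spec_create_indexed_dictionary sentences dict_size (create_indexed_dictionary sentences dict_size)

-- ===== LEMMAS AND PROOFS =====

-- Both counting loops build Counter(flattened words): A's via d.modify, B's via insert/getD
-- (modify w 0 (·+1) IS insert w (getD w 0 + 1)).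
lemma pv_count_eq (sentences : List (List String)) :
    sentences.foldl (fun d sen => sen.foldl (fun d word => d.modify word 0 (· + 1)) d) PySem.Dict.empty
      = PySem.Dict.counter sentences.flatten := by
  simp [PySem.Dict.counter, List.foldl_flatten]

lemma pv_count_eq' (sentences : List (List String)) :
    sentences.foldl (fun d sen => sen.foldl (fun d word => d.insert word (d.getD word 0 + 1)) d) PySem.Dict.empty
      = PySem.Dict.counter sentences.flatten := by
  rw [← pv_count_eq]; rfl

-- insertBy walks past a block it does not go before
lemma pv_insertBy_skip {α : Type} (before : α → α → Bool) (x : α) (G R : List α)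
    (h : ∀ y ∈ G, before x y = false) :
    PySem.List.insertBy before x (G ++ R) = G ++ PySem.List.insertBy before x R := by
  induction G with
  | nil => rfl
  | cons g G ih =>
      have hg := h g (by simp)
      simp [PySem.List.insertBy, hg, ih (fun y hy => h y (by simp [hy]))]

lemma pv_insertBy_front {α : Type} (before : α → α → Bool) (x : α) (R : List α)
    (h : ∀ y ∈ R, before x y = true) :
    PySem.List.insertBy before x R = x :: R := by
  cases R with
  | nil => rfl
  | cons r R => simp [PySem.List.insertBy, h r (by simp)]

-- stable descending insertion of an element into a key-grouped list lands at the end of its group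
lemma pv_insertBy_grouped (D : List Int) (hD : D.Pairwise (· > ·)) (P : List (String × Int))
    (x : String × Int) (hx : x.2 ∈ D) :
    PySem.List.insertBy (fun a b => decide (b.2 < a.2)) x
        (D.flatMap (fun c => P.filter (fun p => p.2 == c)))
      = D.flatMap (fun c => (P ++ [x]).filter (fun p => p.2 == c)) := by
  induction D with
  | nil => simp at hx
  | cons c D ih =>
      have hlt : ∀ c' ∈ D, c' < c := fun c' hc' => (List.pairwise_cons.mp hD).1 c' hc'
      have hD' : D.Pairwise (· > ·) := (List.pairwise_cons.mp hD).2
      have hGmem : ∀ y ∈ P.filter (fun p => p.2 == c), (y : String × Int).2 = c := by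
        intro y hy; simpa using (List.mem_filter.mp hy).2
      have hRmem : ∀ y ∈ D.flatMap (fun c' => P.filter (fun p => p.2 == c')),
          (y : String × Int).2 < c := by
        intro y hy
        rcases List.mem_flatMap.mp hy with ⟨c', hc', hy'⟩
        have : y.2 = c' := by simpa using (List.mem_filter.mp hy').2
        simpa [this] using hlt c' hc'
      rcases List.mem_cons.mp hx with hxc | hxD
      · -- x belongs to the first bucket: skip it, then insert before the (strictly smaller) rest
        rw [List.flatMap_cons, pv_insertBy_skip _ _ _ _
            (fun y hy => by simp [hGmem y hy, hxc]),
          pv_insertBy_front _ _ _ (fun y hy => by simp [hxc]; exact hRmem y hy)]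
        have hrest : D.flatMap (fun c' => (P ++ [x]).filter (fun p => p.2 == c'))
            = D.flatMap (fun c' => P.filter (fun p => p.2 == c')) := by
          apply List.flatMap_congr
          intro c' hc'
          have : ¬ (x.2 == c') = true := by
            simp [hxc]; exact fun h => absurd (h ▸ hlt c' hc') (lt_irrefl c)
          simp [List.filter_append, List.filter_cons]
          intro h; exact absurd h (by simpa [hxc] using this)
        rw [List.flatMap_cons, hrest]
        simp [List.filter_append, hxc]
      · -- x belongs to a later bucket: its key is < c, so it skips the whole first group
        have hxlt : x.2 < c := hlt _ hxD
        rw [List.flatMap_cons, pv_insertBy_skip _ _ _ _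
            (fun y hy => by simp [hGmem y hy]; omega),
          ih hD' hxD, List.flatMap_cons]
        have : (P ++ [x]).filter (fun p => p.2 == c) = P.filter (fun p => p.2 == c) := by
          simp [List.filter_append, List.filter_cons]
          intro h; omega
        rw [this]

-- the whole stable descending sort, as buckets over the strictly descending key list D
lemma pv_foldl_insertBy_grouped (D : List Int) (hD : D.Pairwise (· > ·))
    (L P : List (String × Int)) (hL : ∀ p ∈ L, (p : String × Int).2 ∈ D) :
    L.foldl (fun acc x => PySem.List.insertBy (fun a b => decide (b.2 < a.2)) x acc)
        (D.flatMap (fun c => P.filter (fun p => p.2 == c)))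
      = D.flatMap (fun c => (P ++ L).filter (fun p => p.2 == c)) := by
  induction L generalizing P with
  | nil => simp
  | cons x L ih =>
      rw [List.foldl_cons, pv_insertBy_grouped D hD P x (hL x (by simp)),
        ih (P ++ [x]) (fun p hp => hL p (by simp [hp]))]
      simp

lemma pv_sorted_rev_snd_eq (L : List (String × Int)) (D : List Int) (hD : D.Pairwise (· > ·))
    (hL : ∀ p ∈ L, (p : String × Int).2 ∈ D) :
    PySem.List.sorted L (fun p => p.2) true = D.flatMap (fun c => L.filter (fun p => p.2 == c)) := by
  rw [PySem.List.sorted_rev_eq_foldl_insertBy]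
  have h := pv_foldl_insertBy_grouped D hD L [] hL
  simpa [List.flatMap_def] using h

-- B's buckets: buckets[c] lists, in item order, the words whose count is c
lemma pv_buckets_getD (L : List (String × Int)) (c : Int) :
    (L.foldl (fun b p => b.modify p.2 [] (· ++ [p.1])) (PySem.Dict.empty : PySem.Dict Int (List String))).getD c []
      = (L.filter (fun p => p.2 == c)).map (fun p => p.1) := by
  have h : L.foldl (fun b p => b.modify p.2 [] (· ++ [p.1])) (PySem.Dict.empty : PySem.Dict Int (List String))
      = (L.map (fun p => (p.2, p.1))).foldl (fun b q => b.modify q.1 [] (· ++ [q.2])) PySem.Dict.empty := by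
    rw [List.foldl_map]
  rw [h, PySem.Dict.getD_foldl_modify_append]
  simp [List.filter_map, Function.comp_def, List.map_map]

lemma pv_buckets_keys (L : List (String × Int)) :
    (L.foldl (fun b p => b.modify p.2 [] (· ++ [p.1])) (PySem.Dict.empty : PySem.Dict Int (List String))).keys
      = PySem.Set.ofList (L.map (fun p => p.2)) := by
  rw [PySem.Dict.keys_foldl_modify_key L (fun p => p.2) [] (fun _ p v => v ++ [p.1])]
  simp [PySem.Dict.keys_empty, PySem.Set.ofList, PySem.Set.update, PySem.Set.empty]

lemma pv_keysDesc_pairwise (K : List Int) (hK : K.Nodup) :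
    (PySem.List.sorted K (fun c => c) true).Pairwise (· > ·) := by
  have h1 := PySem.List.sorted_pairwise_rev K (fun c => c)
  have h2 : (PySem.List.sorted K (fun c => c) true).Nodup :=
    ((PySem.List.sorted_perm K (fun c => c) true).nodup_iff).mpr hK
  exact (h1.and h2).imp (by intro a b h; rcases h with ⟨hle, hne⟩; omega)

-- B's bucket walk reconstructs the stable descending sort of the items by count
lemma pv_top0_eq (L : List (String × Int)) :
    (PySem.List.sorted
        ((L.foldl (fun b p => b.modify p.2 [] (· ++ [p.1])) (PySem.Dict.empty : PySem.Dict Int (List String))).keys)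
        (fun c => c) true).foldl
      (fun acc c => acc ++ ((L.foldl (fun b p => b.modify p.2 [] (· ++ [p.1])) (PySem.Dict.empty : PySem.Dict Int (List String))).getD c []).map (fun w => (w, c))) []
    = PySem.List.sorted L (fun p => p.2) true := by
  rw [pv_buckets_keys, PySem.List.foldl_append_eq_flatMap]
  have hD := pv_keysDesc_pairwise (PySem.Set.ofList (L.map (fun p => p.2)))
    (PySem.Set.nodup_ofList _)
  rw [pv_sorted_rev_snd_eq L _ hD (fun p hp => by
    rw [PySem.List.mem_sorted, PySem.Set.mem_ofList]
    exact List.mem_map_of_mem hp)]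
  simp only [List.nil_append]
  apply List.flatMap_congr
  intro c _
  rw [pv_buckets_getD, List.map_map]
  calc (L.filter (fun p => p.2 == c)).map ((fun w => (w, c)) ∘ (fun p => p.1))
      = (L.filter (fun p => p.2 == c)).map (fun p => p) := by
        apply List.map_congr_left
        intro p hp
        have : p.2 = c := by simpa using (List.mem_filter.mp hp).2
        simp [← this]
    _ = L.filter (fun p => p.2 == c) := List.map_id' _

-- items of Counter pair each word with its count
lemma pv_counter_getD_item (ws : List String) (p : String × Int)
    (hp : p ∈ (PySem.Dict.counter ws).items) :
    (PySem.Dict.counter ws).getD p.1 0 = p.2 := by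
  rw [PySem.Dict.items_counter] at hp
  rcases List.mem_map.mp hp with ⟨w, _, rfl⟩
  simp

-- ===== VERDICT (by name: the statement is the Claim_ definition above) =====
theorem create_indexed_dictionary_spec : Claim_equal_create_indexed_dictionary := by
  intro sentences dict_size _
  unfold Spec_create_indexed_dictionary
  simp only [create_indexed_dictionary, create_indexed_dictionary_alt,
    pv_count_eq, pv_count_eq', pv_top0_eq]
  set cw := PySem.Dict.counter sentences.flatten with hcw
  set S := PySem.List.sorted cw.items (fun p => p.2) true with hS
  -- the two selections agree
  have hk : (0 : Int) ≤ (if dict_size > 0 then dict_size else 0) := by split_ifs <;> omega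
  rw [PySem.List.slice_to _ hk]
  have hsel : (if dict_size ≤ 0 then [] else S.take dict_size.toNat)
      = S.take (if dict_size > 0 then dict_size else 0).toNat := by
    split_ifs with h1 h2
    · omega
    · simp
    · rfl
    · omega
  rw [hsel]
  set T := S.take (if dict_size > 0 then dict_size else 0).toNat with hT
  -- the final loop: the fresh index is read straight back, and the stored count is the item's
  have hmem : ∀ ie ∈ PySem.List.enumerate T 0, cw.getD (ie : Int × String × Int).2.1 0 = ie.2.2 := by
    intro ie hie
    have h2 : ie.2 ∈ T := by
      rw [← PySem.List.map_snd_enumerate T 0]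
      exact List.mem_map_of_mem hie
    have h3 : ie.2 ∈ cw.items := by
      rw [← PySem.List.mem_sorted cw.items (fun p => p.2) true]
      exact List.mem_of_mem_take h2
    exact pv_counter_getD_item _ _ h3
  rw [PySem.List.foldl_congr_mem _ _
    (fun (st : PySem.Dict String Int × List (Int × Int)) ie =>
      (st.1.insert ie.2.1 ie.1, st.2 ++ [(ie.1, ie.2.2)])) _
    (fun acc ie hie => by
      simp only [PySem.Dict.getD_insert_self, hmem ie hie])]
  rw [PySem.List.foldl_prod_mk (f := fun (d : PySem.Dict String Int) (ie : Int × String × Int) => d.insert ie.2.1 ie.1)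
    (g := fun (v : List (Int × Int)) ie => v ++ [(ie.1, ie.2.2)])]
  rw [PySem.List.foldl_append_singleton_eq_map (fun (ie : Int × String × Int) => (ie.1, ie.2.2))]
  simp
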